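-- pv_equiv track=rewrite | github.com/MarcoAnotino/python-logic-challenges-envioclick | ejercicio_01_contar_ocurrencias/ocurrencias.py | contar_ocurrencias
-- ===== SOURCE A (Python) =====
-- def es_separador(caracter: str) -> bool:
--     """
--         Determina si un carácter se considera separador de palabras.
--
--         Un separador es cualquier carácter que delimita palabras para validar
--         coincidencias completas (no subcadenas). Se consideran separadores:
--         - Espacio (" ").
--         - Caracteres de control tipo espacio/tabulación/salto de línea (códigos 9 a 13).
--         - Signos de puntuación: ., , ; :
--         - Signos de interrogación y exclamación: ¡ ! ¿ ?
--         - Paréntesis, comillas y guion: ( ) " ' -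
--
--         :param caracter: Carácter individual a evaluar.
--         :return: True si es separador; False en caso contrario.
--     """
--     codigo = ord(caracter)
--
--     if caracter == " ":
--         return True
--
--     if 9 <= codigo <= 13:
--         return True
--
--     if caracter == "." or caracter == "," or caracter == ";" or caracter == ":":
--         return True
--
--     if caracter == "¡" or caracter == "!" or caracter == "¿" or caracter == "?":
--         return True
--
--     if caracter == "(" or caracter == ")" or caracter == "\"" or caracter == "'" or caracter == "-":
--         return True
--
--     return False
--
-- def contar_ocurrencias(parrafo: str, texto:str) -> int:
--     """
--         Cuenta cuántas veces aparece una palabra/expresión dentro de un párrafo,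
--         comparando carácter por carácter y validando límites de palabra.
--
--         Reglas:
--         - La comparación es insensible a mayúsculas/minúsculas.
--         - Solo cuenta coincidencias completas: el match debe estar delimitado por
--         separadores (inicio/fin de cadena o un carácter considerado separador).
--         - No usa funciones facilitadoras como 'in', 'find', 'index', regex, etc.
--
--         :param parrafo: Texto donde se buscarán las ocurrencias.
--         :param texto: Texto a buscar dentro del párrafo.
--         :return: Número total de ocurrencias válidas encontradas.
--     """
--     parrafo_normalizado = parrafo.lower()
--     texto_normalizado = texto.lower()
--
--     largo_parrafo = len(parrafo_normalizado)
--     largo_texto = len(texto_normalizado)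
--
--     if largo_texto > largo_parrafo:
--         return 0
--     if largo_texto == 0 or largo_parrafo == 0:
--         return 0
--
--     total = 0
--     i = 0
--
--     while i <= largo_parrafo - largo_texto:
--         j = 0
--         coincide = True
--
--         while j < largo_texto:
--             if parrafo_normalizado[i + j] != texto_normalizado[j]:
--                 coincide = False
--                 break
--             j += 1
--
--         if coincide:
--             inicio_ok = False
--             fin_ok = False
--
--             if i == 0:
--                 inicio_ok = True
--             else:
--                 inicio_ok = es_separador(parrafo_normalizado[i - 1])
--
--             final_index = i + largo_texto
--             if final_index == largo_parrafo:
--                 fin_ok = True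
--             else:
--                 fin_ok = es_separador(parrafo_normalizado[final_index])
--
--             if inicio_ok and fin_ok:
--                 total += 1
--
--         i += 1
--
--     return total
-- ===== SOURCE B (Python) =====
-- SEPARADORES = set(" \t\n\x0b\x0c\r.,;:\u00a1!\u00bf?()\"'-")
--
--
-- def contar_ocurrencias(parrafo: str, texto: str) -> int:
--     p = parrafo.lower()
--     t = texto.lower()
--     if not t:
--         return 0
--     total = 0
--     i = p.find(t)
--     while i != -1:
--         if (i == 0 or p[i - 1] in SEPARADORES) and \
--            (i + len(t) == len(p) or p[i + len(t)] in SEPARADORES):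
--             total += 1
--         i = p.find(t, i + 1)
--     return total
-- ===== Notes on version B (the rewrite author's own statement) =====
-- stated objective: faster
-- what changed: Replaces A's hand-written outer scan with char-by-char inner comparison at every position by a loop over str.find hits (C-level substring search) with the same word-boundary checks, the separators held in a set constant.
import Mathlib
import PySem

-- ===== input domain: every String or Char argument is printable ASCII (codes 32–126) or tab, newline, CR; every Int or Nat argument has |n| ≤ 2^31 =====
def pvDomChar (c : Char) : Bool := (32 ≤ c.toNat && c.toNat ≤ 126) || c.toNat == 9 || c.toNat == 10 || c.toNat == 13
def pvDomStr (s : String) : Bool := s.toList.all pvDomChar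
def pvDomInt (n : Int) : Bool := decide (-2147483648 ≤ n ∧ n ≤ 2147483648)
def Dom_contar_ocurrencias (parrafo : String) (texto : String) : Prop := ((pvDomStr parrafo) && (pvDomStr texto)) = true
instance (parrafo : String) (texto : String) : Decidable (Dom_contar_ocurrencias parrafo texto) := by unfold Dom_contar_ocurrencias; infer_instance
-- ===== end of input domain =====

-- B replaces A's position-by-position hand-written comparison loop with a str.find-driven
-- loop over match positions plus the same word-boundary checks; equivalence of the return
-- values is proved for all strings.

-- ===== PORT A =====
def esSeparador (caracter : Char) : Bool :=
  let codigo := caracter.toNat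
  if caracter = ' ' then true
  else if 9 ≤ codigo ∧ codigo ≤ 13 then true
  else if caracter = '.' ∨ caracter = ',' ∨ caracter = ';' ∨ caracter = ':' then true
  else if caracter = '¡' ∨ caracter = '!' ∨ caracter = '¿' ∨ caracter = '?' then true
  else if caracter = '(' ∨ caracter = ')' ∨ caracter = '"' ∨ caracter = '\'' ∨ caracter = '-' then true
  else false

-- A's inner 'while j < largo_texto' loop (indices are in range whenever A runs it)
def innerLoopA (p t : List Char) (i j : Nat) : Bool :=
  if j < t.length then
    if p.getD (i + j) ' ' ≠ t.getD j ' ' then false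
    else innerLoopA p t i (j + 1)
  else true
termination_by t.length - j

-- A's outer 'while i <= largo_parrafo - largo_texto' loop (only entered with t.length ≤ p.length)
def outerLoopA (p t : List Char) (i : Nat) (total : Int) : Int :=
  if i ≤ p.length - t.length then
    let total' :=
      if innerLoopA p t i 0 then
        let inicio_ok := if i = 0 then true else esSeparador (p.getD (i - 1) ' ')
        let final_index := i + t.length
        let fin_ok := if final_index = p.length then true else esSeparador (p.getD final_index ' ')
        if inicio_ok && fin_ok then total + 1 else total
      else total
    outerLoopA p t (i + 1) total'
  else total
termination_by p.length + 1 - i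

def contar_ocurrencias (parrafo : String) (texto : String) : Int :=
  let parrafo_normalizado := PySem.Chars.lower parrafo.toList
  let texto_normalizado := PySem.Chars.lower texto.toList
  let largo_parrafo := parrafo_normalizado.length
  let largo_texto := texto_normalizado.length
  if largo_texto > largo_parrafo then 0
  else if largo_texto = 0 ∨ largo_parrafo = 0 then 0
  else outerLoopA parrafo_normalizado texto_normalizado 0 0

-- ===== PORT B =====
-- SEPARADORES = set(" \t\n\x0b\x0c\r.,;:¡!¿?()\"'-")
def sepsB : PySem.Set Char := PySem.Set.ofList " \t\n\x0B\x0C\r.,;:¡!¿?()\"'-".toList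

-- s.find(sub, start) with a start past len(s) finds nothing (termination of findLoopB)
theorem findFrom_ne_imp_start_le (p t : List Char) (k : Nat)
    (h : PySem.Chars.findFrom p t (k : Int) none ≠ -1) : k ≤ p.length := by
  by_contra hk
  push Not at hk
  have hlt : (p.length : Int) < (k : Int) := by exact_mod_cast hk
  simp [PySem.Chars.findFrom, hlt, Int.not_lt.mpr (Int.natCast_nonneg k)] at h

-- B's 'while i != -1' loop, advancing the search start past each hit
def findLoopB (p t : List Char) (start : Nat) (total : Int) : Int :=
  let i := PySem.Chars.findFrom p t (start : Int) none
  if h : i = -1 then total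
  else
    let j := i.toNat
    let ok := (decide (j = 0) || PySem.Set.contains sepsB (p.getD (j - 1) ' ')) &&
              (decide (j + t.length = p.length) || PySem.Set.contains sepsB (p.getD (j + t.length) ' '))
    findLoopB p t (j + 1) (if ok then total + 1 else total)
termination_by p.length + 1 - start
decreasing_by
  have hle := findFrom_ne_imp_start_le p t start h
  have hsp := (PySem.Chars.findFrom_natCast_spec p t start hle h).1
  omega

def contar_ocurrencias_alt (parrafo : String) (texto : String) : Int :=
  let p := PySem.Chars.lower parrafo.toList
  let t := PySem.Chars.lower texto.toList
  if t.length = 0 then 0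
  else findLoopB p t 0 0

-- ===== PRECONDITION & SPEC =====
def Spec_contar_ocurrencias (parrafo : String) (texto : String) (out : Int) : Prop := out = contar_ocurrencias_alt parrafo texto
instance (parrafo : String) (texto : String) (out : Int) : Decidable (Spec_contar_ocurrencias parrafo texto out) := by unfold Spec_contar_ocurrencias; infer_instance

-- ===== CLAIM (what is proved, stated in full; the proofs are below) =====
def Claim_equal_contar_ocurrencias : Prop := ∀ (parrafo : String) (texto : String), Dom_contar_ocurrencias parrafo texto → Spec_contar_ocurrencias parrafo texto (contar_ocurrencias parrafo texto)

-- ===== LEMMAS AND PROOFS =====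

-- a position i is counted iff t occurs there and both neighbours are separators (or string edges)
def okAt (p t : List Char) (i : Nat) : Bool :=
  decide (t <+: p.drop i) &&
  ((decide (i = 0) || esSeparador (p.getD (i - 1) ' ')) &&
   (decide (i + t.length = p.length) || esSeparador (p.getD (i + t.length) ' ')))

def countValid (p t : List Char) (i : Nat) : Nat :=
  (List.range' i (p.length + 1 - i)).countP (okAt p t)

-- B's separator set contains exactly the characters A's es_separador accepts
theorem sep_eq (c : Char) : PySem.Set.contains sepsB c = esSeparador c := by
  have key : ∀ (d : Char), (c = d) ↔ (c.toNat = d.toNat) :=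
    fun d => ⟨fun h => h ▸ rfl, fun h => Char.ext (UInt32.toNat_inj.mp h)⟩
  rw [Bool.eq_iff_iff]
  simp [sepsB, PySem.Set.contains, esSeparador, key]
  omega

theorem innerLoopA_eq_true_iff (p t : List Char) (i : Nat) :
    ∀ j, (innerLoopA p t i j = true ↔ ∀ k, j ≤ k → k < t.length → p.getD (i + k) ' ' = t.getD k ' ') := by
  suffices H : ∀ n j, t.length - j ≤ n →
      (innerLoopA p t i j = true ↔ ∀ k, j ≤ k → k < t.length → p.getD (i + k) ' ' = t.getD k ' ') by
    exact fun j => H (t.length - j) j le_rfl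
  intro n
  induction n with
  | zero =>
    intro j hj
    rw [innerLoopA, if_neg (by omega : ¬ j < t.length)]
    exact ⟨fun _ k hk1 hk2 => by omega, fun _ => rfl⟩
  | succ n ih =>
    intro j hj
    rw [innerLoopA]
    by_cases hjt : j < t.length
    · rw [if_pos hjt]
      by_cases hne : p.getD (i + j) ' ' ≠ t.getD j ' '
      · rw [if_pos hne]
        exact ⟨fun h => absurd h (by simp), fun h => absurd (h j le_rfl hjt) hne⟩
      · rw [if_neg hne]
        push Not at hne
        rw [ih (j + 1) (by omega)]
        constructor
        · intro h k hk1 hk2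
          rcases Nat.eq_or_lt_of_le hk1 with rfl | hlt
          · exact hne
          · exact h k hlt hk2
        · intro h k hk1 hk2; exact h k (by omega) hk2
    · rw [if_neg hjt]
      exact ⟨fun _ k hk1 hk2 => by omega, fun _ => rfl⟩

theorem prefix_iff_chars (p t : List Char) (i : Nat) (hi : i + t.length ≤ p.length) :
    t <+: p.drop i ↔ ∀ k, k < t.length → p.getD (i + k) ' ' = t.getD k ' ' := by
  rw [List.prefix_iff_getElem?]
  constructor
  · intro h k hk
    have h2 := h k hk
    rw [List.getElem?_drop] at h2
    rw [List.getD_eq_getElem?_getD, List.getD_eq_getElem?_getD, h2,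
      List.getElem?_eq_getElem hk]
  · intro h k hk
    have hik : i + k < p.length := by omega
    have h2 := h k hk
    rw [List.getD_eq_getElem?_getD, List.getD_eq_getElem?_getD,
      List.getElem?_eq_getElem hk, List.getElem?_eq_getElem hik] at h2
    rw [List.getElem?_drop, List.getElem?_eq_getElem hik]
    simpa using h2

theorem innerLoopA_iff (p t : List Char) (i : Nat) (hi : i + t.length ≤ p.length) :
    innerLoopA p t i 0 = true ↔ t <+: p.drop i := by
  rw [innerLoopA_eq_true_iff, prefix_iff_chars p t i hi]
  exact ⟨fun h k hk => h k (Nat.zero_le k) hk, fun h k _ hk => h k hk⟩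

theorem okAt_false_of (p t : List Char) (i : Nat) (h : p.length < i + t.length)
    (hi : i ≤ p.length) : okAt p t i = false := by
  have hnp : ¬ (t <+: p.drop i) := by
    intro hp
    have := hp.length_le
    simp [List.length_drop] at this
    omega
  simp [okAt, hnp]

theorem countValid_zero_of (p t : List Char) (i : Nat)
    (h : ∀ m, i ≤ m → m ≤ p.length → okAt p t m = false) : countValid p t i = 0 := by
  unfold countValid
  rw [List.countP_eq_zero]
  intro m hm
  rw [List.mem_range'_1] at hm
  simp [h m hm.1 (by omega)]

theorem countValid_step (p t : List Char) (i : Nat) (hi : i ≤ p.length) :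
    countValid p t i = (if okAt p t i then 1 else 0) + countValid p t (i + 1) := by
  unfold countValid
  have h1 : p.length + 1 - i = (p.length - i) + 1 := by omega
  rw [h1, List.range'_succ, List.countP_cons]
  have h2 : p.length + 1 - (i + 1) = p.length - i := by omega
  rw [h2]
  by_cases h : okAt p t i
  · simp [h]; omega
  · simp [h]

theorem countValid_skip (p t : List Char) (i j : Nat) (hij : i ≤ j) (hj : j ≤ p.length + 1)
    (h : ∀ m, i ≤ m → m < j → okAt p t m = false) : countValid p t i = countValid p t j := by
  unfold countValid
  rw [show p.length + 1 - i = (j - i) + (p.length + 1 - j) by omega, ← List.range'_append,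
    List.countP_append, show i + 1 * (j - i) = j by omega]
  have hz : (List.range' i (j - i)).countP (okAt p t) = 0 := by
    rw [List.countP_eq_zero]
    intro m hm
    rw [List.mem_range'_1] at hm
    simp [h m hm.1 (by omega)]
  omega

theorem outerLoopA_eq (p t : List Char) (ht : 0 < t.length) (hpt : t.length ≤ p.length) :
    ∀ i total, outerLoopA p t i total = total + countValid p t i := by
  suffices H : ∀ n i, p.length + 1 - i ≤ n → ∀ total, outerLoopA p t i total = total + countValid p t i by
    exact fun i => H (p.length + 1 - i) i le_rfl
  intro n
  induction n with
  | zero =>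
    intro i hi total
    rw [outerLoopA, if_neg (by omega : ¬ i ≤ p.length - t.length)]
    rw [countValid_zero_of p t i (fun m hm hmp => okAt_false_of p t m (by omega) (by omega))]
    omega
  | succ n ih =>
    intro i hi total
    rw [outerLoopA]
    by_cases hile : i ≤ p.length - t.length
    · rw [if_pos hile]
      have hin : i + t.length ≤ p.length := by omega
      rw [ih (i + 1) (by omega)]
      rw [countValid_step p t i (by omega)]
      by_cases hm : innerLoopA p t i 0
      · have hpre : t <+: p.drop i := (innerLoopA_iff p t i hin).mp hm
        have hok : okAt p t i =
            ((if i = 0 then true else esSeparador (p.getD (i - 1) ' ')) &&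
             (if i + t.length = p.length then true else esSeparador (p.getD (i + t.length) ' '))) := by
          simp only [okAt, hpre, decide_true, Bool.true_and]
          congr 1
          · by_cases h0 : i = 0 <;> simp [h0]
          · by_cases hf : i + t.length = p.length <;> simp [hf]
        rw [hok]
        simp only [hm, if_true]
        generalize ((if i = 0 then true else esSeparador (p.getD (i - 1) ' ')) &&
             (if i + t.length = p.length then true else esSeparador (p.getD (i + t.length) ' '))) = C
        cases C
        · simp
        · simp; omega
      · have hpre : ¬ (t <+: p.drop i) := fun hp => hm ((innerLoopA_iff p t i hin).mpr hp)
        have hok : okAt p t i = false := by simp [okAt, hpre]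
        simp only [Bool.not_eq_true] at hm
        simp only [hm, Bool.false_eq_true, if_false, hok]
        omega
    · rw [if_neg hile]
      rw [countValid_zero_of p t i (fun m hm hmp => okAt_false_of p t m (by omega) (by omega))]
      omega

theorem findLoopB_eq (p t : List Char) (ht : 0 < t.length) :
    ∀ start total, findLoopB p t start total = total + countValid p t start := by
  suffices H : ∀ n start, p.length + 1 - start ≤ n → ∀ total, findLoopB p t start total = total + countValid p t start by
    intro start total
    exact H (p.length + 1 - start) start le_rfl total
  intro n
  induction n with
  | zero =>
    intro start hs total
    rw [findLoopB, dif_pos (by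
      by_contra h
      exact absurd (findFrom_ne_imp_start_le p t start h) (by omega))]
    rw [countValid_zero_of p t start (fun m hm hmp => by omega)]
    omega
  | succ n ih =>
    intro start hs total
    rw [findLoopB]
    by_cases h : PySem.Chars.findFrom p t (start : Int) none = -1
    · rw [dif_pos h]
      by_cases hsl : start ≤ p.length
      · have hni : ¬ (t <:+: p.drop start) :=
          (PySem.Chars.findFrom_natCast_eq_neg_one_iff p t start hsl).mp h
        rw [countValid_zero_of p t start (fun m hm hmp => by
          have hnm : ¬ (t <+: p.drop m) := by
            intro hpm
            apply hni
            have hdd : p.drop m = (p.drop start).drop (m - start) := by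
              rw [List.drop_drop]
              congr 1
              omega
            rw [hdd] at hpm
            exact hpm.isInfix.trans (List.drop_suffix _ _).isInfix
          simp [okAt, hnm])]
        omega
      · rw [countValid_zero_of p t start (fun m hm hmp => by omega)]
        omega
    · rw [dif_neg h]
      have hsl := findFrom_ne_imp_start_le p t start h
      obtain ⟨h1, h2, h3⟩ := PySem.Chars.findFrom_natCast_spec p t start hsl h
      set i := PySem.Chars.findFrom p t (start : Int) none with hidef
      have hsj : start ≤ i.toNat := by omega
      have hjp : i.toNat + t.length ≤ p.length := by
        have := h2.length_le
        simp [List.length_drop] at this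
        omega
      rw [ih (i.toNat + 1) (by omega)]
      rw [countValid_skip p t start i.toNat hsj (by omega) (fun m hm hmj => by
        have hnm := h3 m hm hmj
        simp [okAt, hnm])]
      rw [countValid_step p t i.toNat (by omega)]
      have hok : ((decide (i.toNat = 0) || PySem.Set.contains sepsB (p.getD (i.toNat - 1) ' ')) &&
              (decide (i.toNat + t.length = p.length) || PySem.Set.contains sepsB (p.getD (i.toNat + t.length) ' ')))
          = okAt p t i.toNat := by
        simp only [okAt, h2, decide_true, Bool.true_and, sep_eq]
      rw [hok]
      split <;> omega

-- ===== VERDICT (by name: the statement is the Claim_ definition above) =====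
theorem contar_ocurrencias_spec : Claim_equal_contar_ocurrencias := by
  intro parrafo texto _
  unfold Spec_contar_ocurrencias contar_ocurrencias contar_ocurrencias_alt
  set p := PySem.Chars.lower parrafo.toList with hp
  set t := PySem.Chars.lower texto.toList with htd
  by_cases ht0 : t.length = 0
  · simp [ht0]
  · have ht : 0 < t.length := by omega
    rw [if_neg ht0]
    by_cases hgt : t.length > p.length
    · rw [if_pos hgt]
      rw [findLoopB_eq p t ht 0 0]
      rw [countValid_zero_of p t 0 (fun m hm hmp => okAt_false_of p t m (by omega) (by omega))]
      simp
    · rw [if_neg hgt]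
      have hp0 : p.length ≠ 0 := by omega
      rw [if_neg (by push Not; exact ⟨ht0, hp0⟩)]
      rw [outerLoopA_eq p t ht (by omega) 0 0, findLoopB_eq p t ht 0 0]
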